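-- pv_equiv track=rewrite | github.com/Shin-jongwhan/AI_private | nesting_loop_calulator.py | nested_add
-- ===== SOURCE A (Python) =====
-- def nested_add(lsNesting):
--     """
--     모든 조합에 대해 (x1 + x2 + ... + xk)를 합산.
--     공식: sum_m [ (sum(L_m)) * (∏_{r≠m} |L_r|) ]
--
--     시간 복잡도:
--       - 나이브: O(∏ n_m)
--       - 본 함수: O(∑ n_m + k)
--         * 각 리스트 합(sum)을 구하는 데 O(∑ n_m)
--         * 전체 길이 곱과 각 항의 '다른 리스트 길이들의 곱' 계산은 O(k)
--     """
--     lsLens = [len(lsList) for lsList in lsNesting]                 # 각 리스트 길이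
--     if any(nLen == 0 for nLen in lsLens):                          # 빈 리스트가 있으면 조합 수 0
--         return 0
--
--     nProd_all = 1
--     for nLen in lsLens:
--         nProd_all *= nLen                                          # 전체 길이 곱 (조합 수)
--
--     nTotal = 0
--     for nIdx, lsList in enumerate(lsNesting):
--         nSum_current = sum(lsList)                                 # 해당 리스트의 합  → O(|L_m|)
--         nMult_others = nProd_all // lsLens[nIdx]                   # 다른 리스트 길이들의 곱 → O(1)
--         nTotal += nSum_current * nMult_others
--     return nTotal
-- ===== SOURCE B (Python) =====
-- def nested_add(lsNesting):
--     # Brute force: recursively enumerate the sum of every combination in the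
--     # cross product, then add them all up.
--     def combo_sums(rest):
--         if not rest:
--             return [0]
--         tails = combo_sums(rest[1:])
--         return [x + s for x in rest[0] for s in tails]
--
--     total = 0
--     for s in combo_sums(lsNesting):
--         total += s
--     return total
-- ===== Notes on version B (the rewrite author's own statement) =====
-- stated objective: alternative
-- what changed: Replaced A's closed-form (per-list sums times products of the other lists' lengths) by direct brute-force enumeration: recursively build the sum of every combination of the cross product and add them up.
import Mathlib
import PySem

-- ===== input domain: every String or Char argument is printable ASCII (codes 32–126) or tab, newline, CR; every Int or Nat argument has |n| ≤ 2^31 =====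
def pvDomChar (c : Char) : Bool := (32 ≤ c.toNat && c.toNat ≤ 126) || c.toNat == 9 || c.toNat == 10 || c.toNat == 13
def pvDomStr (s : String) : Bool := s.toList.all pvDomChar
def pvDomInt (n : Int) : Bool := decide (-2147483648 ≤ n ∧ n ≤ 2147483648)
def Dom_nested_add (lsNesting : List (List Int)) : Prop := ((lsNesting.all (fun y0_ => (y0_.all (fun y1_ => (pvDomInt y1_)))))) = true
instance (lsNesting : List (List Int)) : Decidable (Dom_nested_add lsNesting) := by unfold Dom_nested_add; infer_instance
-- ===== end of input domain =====

-- B replaces A's closed form by direct brute-force enumeration of every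
-- combination's sum (alternative decomposition; exponential, not faster).

-- ===== PORT A =====
def nested_add (lsNesting : List (List Int)) : Int :=
  let lsLens : List Int := lsNesting.map (fun lsList => (lsList.length : Int))
  if lsLens.any (fun nLen => nLen == 0) then 0
  else
    let nProd_all : Int := lsLens.foldl (fun a b => a * b) 1
    (PySem.List.enumerate lsNesting 0).foldl
      (fun nTotal p =>
        nTotal + (p.2.foldl (fun a b => a + b) 0) *
          PySem.Int.floordiv nProd_all (PySem.List.pyGetD lsLens p.1 0)) 0

-- ===== PORT B =====
-- combo_sums in Source B: list of the element-sum of every cross-product combination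
def comboSums (rest : List (List Int)) : List Int :=
  match rest with
  | [] => [0]
  | l :: rs => l.flatMap (fun x => (comboSums rs).map (fun s => x + s))

def nested_add_alt (lsNesting : List (List Int)) : Int :=
  (comboSums lsNesting).foldl (fun t s => t + s) 0

-- ===== PRECONDITION & SPEC =====
def Spec_nested_add (lsNesting : List (List Int)) (out : Int) : Prop := out = nested_add_alt lsNesting
instance (lsNesting : List (List Int)) (out : Int) : Decidable (Spec_nested_add lsNesting out) := by unfold Spec_nested_add; infer_instance

-- ===== CLAIM (what is proved, stated in full; the proofs are below) =====
def Claim_equal_nested_add : Prop := ∀ (lsNesting : List (List Int)), Dom_nested_add lsNesting → Spec_nested_add lsNesting (nested_add lsNesting)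

-- ===== LEMMAS AND PROOFS =====

lemma foldl_add_init (l : List Int) (a : Int) :
    l.foldl (fun x y => x + y) a = a + l.sum := by
  induction l generalizing a with
  | nil => simp
  | cons x xs ih => simp [List.foldl_cons, ih, List.sum_cons]; ring

lemma foldl_mul_init (l : List Int) (a : Int) :
    l.foldl (fun x y => x * y) a = a * l.prod := by
  induction l generalizing a with
  | nil => simp
  | cons x xs ih => simp [List.foldl_cons, ih, List.prod_cons]; ring

lemma foldl_add_map {α : Type} (g : α → Int) (xs : List α) (a : Int) :
    xs.foldl (fun t p => t + g p) a = a + (xs.map g).sum := by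
  induction xs generalizing a with
  | nil => simp
  | cons x xs ih => simp [List.foldl_cons, ih]; ring

lemma length_comboSums (ls : List (List Int)) :
    (comboSums ls).length = (ls.map List.length).prod := by
  induction ls with
  | nil => simp [comboSums]
  | cons l rs ih =>
      simp [comboSums, List.length_flatMap, ih, List.map_const', List.sum_replicate, smul_eq_mul]

lemma sum_comboSums_cons (l : List Int) (ls : List (List Int)) :
    (comboSums (l :: ls)).sum
      = ((comboSums ls).length : Int) * l.sum + (l.length : Int) * (comboSums ls).sum := by
  have h : ∀ x : Int, ((comboSums ls).map (fun s => x + s)).sum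
      = ((comboSums ls).length : Int) * x + (comboSums ls).sum := by
    intro x
    induction comboSums ls with
    | nil => simp
    | cons c cs ih =>
        simp [List.map_cons, List.sum_cons, ih]
        ring
  show (List.flatMap _ l).sum = _
  induction l with
  | nil => simp
  | cons x xs ih =>
      simp only [List.flatMap_cons, List.sum_append, ih, h, List.sum_cons,
        List.length_cons]
      push_cast; ring

lemma comboSums_nil_of_mem (ls : List (List Int)) (h : [] ∈ ls) :
    comboSums ls = [] := by
  induction ls with
  | nil => simp at h
  | cons l rs ih =>
      rcases List.mem_cons.mp h with h | h
      · subst h; simp [comboSums]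
      · simp [comboSums, ih h]

lemma sum_terms (ls : List (List Int)) (h : ∀ l ∈ ls, l ≠ ([] : List Int))
    (M : Int) (hM : 0 < M) :
    (ls.map (fun l => l.sum *
        PySem.Int.floordiv (M * (ls.map (fun l => (l.length : Int))).prod) (l.length : Int))).sum
      = M * (comboSums ls).sum := by
  induction ls generalizing M with
  | nil => simp [comboSums]
  | cons l rs ih =>
      have hl : (0 : Int) < (l.length : Int) := by
        have := h l (List.mem_cons_self)
        have : l.length ≠ 0 := by simpa [List.length_eq_zero_iff] using this
        exact_mod_cast Nat.pos_of_ne_zero this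
      have hrs : ∀ l' ∈ rs, l' ≠ ([] : List Int) := fun l' hl' => h l' (List.mem_cons_of_mem _ hl')
      have hprod : (0 : Int) < (rs.map (fun l => (l.length : Int))).prod := by
        apply List.prod_pos
        intro x hx
        rcases List.mem_map.mp hx with ⟨l', hl', rfl⟩
        have : l'.length ≠ 0 := by
          simpa [List.length_eq_zero_iff] using hrs l' hl'
        exact_mod_cast Nat.pos_of_ne_zero this
      have hlen : ((comboSums rs).length : Int) = (rs.map (fun l => (l.length : Int))).prod := by
        rw [length_comboSums]
        push_cast [List.map_map]
        rfl
      -- head term: exact division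
      have hdiv : ∀ a : Int, (0 : Int) < a →
          PySem.Int.floordiv (a * (l.length : Int)) (l.length : Int) = a := by
        intro a ha
        rw [PySem.Int.floordiv_eq_ediv_of_pos hl]
        exact Int.mul_ediv_cancel a (ne_of_gt hl)
      have hMl : 0 < M * (l.length : Int) := mul_pos hM hl
      have key := ih hrs (M * (l.length : Int)) hMl
      simp only [List.map_cons, List.sum_cons, List.prod_cons]
      have e1 : M * ((l.length : Int) * (rs.map (fun l => (l.length : Int))).prod)
          = (M * (rs.map (fun l => (l.length : Int))).prod) * (l.length : Int) := by ring
      rw [e1, hdiv _ (mul_pos hM hprod)]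
      have e2 : (rs.map (fun l' => l'.sum *
          PySem.Int.floordiv (M * (rs.map (fun l => (l.length : Int))).prod * (l.length : Int)) (l'.length : Int))).sum
          = (M * (l.length : Int)) * (comboSums rs).sum := by
        rw [← key]
        congr 1
        apply List.map_congr_left
        intro l' _
        congr 2
        ring
      rw [e2, sum_comboSums_cons, hlen]
      ring

lemma map_enum_getD (f : List Int → Int → Int) :
    ∀ (ls pre : List (List Int)),
      (PySem.List.enumerate ls (pre.length : Int)).map
        (fun p => f p.2 (PySem.List.pyGetD ((pre ++ ls).map (fun l => (l.length : Int))) p.1 0))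
      = ls.map (fun l => f l (l.length : Int)) := by
  intro ls
  induction ls with
  | nil => intro pre; simp [PySem.List.enumerate_nil]
  | cons l rs ih =>
      intro pre
      rw [PySem.List.enumerate_cons, List.map_cons]
      have hhead : PySem.List.pyGetD ((pre ++ l :: rs).map (fun l => (l.length : Int))) (pre.length : Int) 0
          = (l.length : Int) := by
        rw [PySem.List.pyGetD_natCast]
        rw [List.map_append]
        rw [List.getD_eq_getElem?_getD, List.getElem?_append_right (by simp)]
        simp
      have hrest := ih (pre ++ [l])
      have hlen : ((pre ++ [l]).length : Int) = (pre.length : Int) + 1 := by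
        simp
      rw [hlen] at hrest
      have happ : (pre ++ [l]) ++ rs = pre ++ l :: rs := by simp
      rw [happ] at hrest
      rw [hhead, hrest, List.map_cons]

-- ===== VERDICT (by name: the statement is the Claim_ definition above) =====
theorem nested_add_spec : Claim_equal_nested_add := by
  intro ls _
  show nested_add ls = nested_add_alt ls
  unfold nested_add nested_add_alt
  simp only []
  by_cases hany : (ls.map (fun lsList => (lsList.length : Int))).any (fun nLen => nLen == 0) = true
  · -- some inner list is empty: both sides are 0
    rw [if_pos hany]
    rcases List.any_eq_true.mp hany with ⟨n, hn, hzero⟩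
    rcases List.mem_map.mp hn with ⟨l, hl, rfl⟩
    have : l = [] := by
      have : (l.length : Int) = 0 := by simpa using hzero
      have : l.length = 0 := by exact_mod_cast this
      simpa [List.length_eq_zero_iff] using this
    subst this
    rw [comboSums_nil_of_mem ls hl]
    simp
  · rw [if_neg hany]
    have hne : ∀ l ∈ ls, l ≠ ([] : List Int) := by
      intro l hl hnil
      subst hnil
      exact hany (List.any_eq_true.mpr ⟨0, List.mem_map.mpr ⟨[], hl, by simp⟩, by simp⟩)
    -- rewrite A's foldl as a sum over a map
    rw [foldl_add_map (fun p : Int × List Int =>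
      (p.2.foldl (fun a b => a + b) 0) *
        PySem.Int.floordiv ((ls.map (fun lsList => (lsList.length : Int))).foldl (fun a b => a * b) 1)
          (PySem.List.pyGetD (ls.map (fun lsList => (lsList.length : Int))) p.1 0))]
    rw [zero_add]
    have henum := map_enum_getD (fun l n =>
      (l.foldl (fun a b => a + b) 0) *
        PySem.Int.floordiv ((ls.map (fun lsList => (lsList.length : Int))).foldl (fun a b => a * b) 1) n)
      ls []
    simp only [List.nil_append, List.length_nil, Nat.cast_zero] at henum
    rw [henum]
    have hsum : ∀ l : List Int, l.foldl (fun a b => a + b) 0 = l.sum := by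
      intro l; rw [foldl_add_init]; ring
    have hprod : (ls.map (fun lsList => (lsList.length : Int))).foldl (fun a b => a * b) 1
        = 1 * (ls.map (fun lsList => (lsList.length : Int))).prod := foldl_mul_init _ 1
    simp only [hsum, hprod]
    rw [sum_terms ls hne 1 one_pos]
    ring
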